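-- pv_equiv track=rewrite | github.com/kara-ry/useful_bioinfo_scripts | window_counts_vcf.py | count_variants_and_genes
-- ===== SOURCE A (Python) =====
-- def count_variants_and_genes(chromosome_lengths, gene_locations, variant_locations, window_size):
--     results = []
--     for chromosome, length in chromosome_lengths.items():
--         for window_start in range(1, length, window_size):
--             window_end = min(window_start + window_size - 1, length)
--             variant_count = sum(window_start <= variant[1] <= window_end for variant in variant_locations if variant[0] == chromosome)
--             gene_count = sum(window_start <= gene[1] <= window_end for gene in gene_locations if gene[0] == chromosome)
--             results.append((chromosome, window_start, window_end, variant_count, gene_count))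
--     return results
-- ===== SOURCE B (Python) =====
-- def count_variants_and_genes(chromosome_lengths, gene_locations, variant_locations, window_size):
--     def bucket_counts(locations):
--         counts = {}
--         for chrom, pos in locations:
--             length = chromosome_lengths.get(chrom)
--             if length is not None and 1 <= pos <= length:
--                 key = (chrom, (pos - 1) // window_size)
--                 counts[key] = counts.get(key, 0) + 1
--         return counts
--     variant_counts = bucket_counts(variant_locations)
--     gene_counts = bucket_counts(gene_locations)
--     results = []
--     for chrom, length in chromosome_lengths.items():
--         for start in range(1, length, window_size):
--             idx = (start - 1) // window_size
--             results.append((chrom, start, min(start + window_size - 1, length),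
--                             variant_counts.get((chrom, idx), 0),
--                             gene_counts.get((chrom, idx), 0)))
--     return results
-- ===== Notes on version B (the rewrite author's own statement) =====
-- stated objective: faster
-- what changed: Instead of rescanning all variant and gene lists for every window, B buckets variants and genes once into hash-map counters keyed by (chromosome, window index = (pos-1)//window_size) and then emits each window with two O(1) lookups.
-- outside the precondition, e.g. on count_variants_and_genes({}, [], [], 0): A returns [], B returns []
import Mathlib
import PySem

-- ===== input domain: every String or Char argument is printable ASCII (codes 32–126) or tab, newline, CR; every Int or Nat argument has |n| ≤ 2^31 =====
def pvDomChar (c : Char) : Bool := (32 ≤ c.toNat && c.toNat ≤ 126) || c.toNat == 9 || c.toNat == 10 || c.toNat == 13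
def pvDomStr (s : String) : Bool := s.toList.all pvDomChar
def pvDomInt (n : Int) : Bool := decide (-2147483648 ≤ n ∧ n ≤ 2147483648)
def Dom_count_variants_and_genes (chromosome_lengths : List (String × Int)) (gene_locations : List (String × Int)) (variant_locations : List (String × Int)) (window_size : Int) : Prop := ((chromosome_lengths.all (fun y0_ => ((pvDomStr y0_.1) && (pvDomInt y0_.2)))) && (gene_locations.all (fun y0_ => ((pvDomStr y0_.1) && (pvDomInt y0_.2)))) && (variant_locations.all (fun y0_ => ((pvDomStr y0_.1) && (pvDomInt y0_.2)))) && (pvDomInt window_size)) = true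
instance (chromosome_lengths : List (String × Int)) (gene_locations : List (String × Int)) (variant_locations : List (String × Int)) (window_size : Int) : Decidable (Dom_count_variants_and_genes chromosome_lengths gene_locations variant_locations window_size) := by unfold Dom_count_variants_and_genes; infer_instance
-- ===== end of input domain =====

-- B replaces A's per-window rescans of the variant and gene lists by counters bucketed once per (chromosome, window index); proved equal whenever window_size ≠ 0.


-- ===== PORT A =====
def count_variants_and_genes (chromosome_lengths : List (String × Int)) (gene_locations : List (String × Int)) (variant_locations : List (String × Int)) (window_size : Int) : List (String × Int × Int × Int × Int) :=
  (PySem.Dict.ofList chromosome_lengths).items.foldl (fun results cw =>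
    (PySem.List.pyRange 1 cw.2 window_size).foldl (fun results window_start =>
      let window_end := min (window_start + window_size - 1) cw.2
      let variant_count := ((variant_locations.filter (fun v => v.1 == cw.1)).map
        (fun v => if (decide (window_start ≤ v.2) && decide (v.2 ≤ window_end)) = true then (1 : Int) else 0)).sum
      let gene_count := ((gene_locations.filter (fun g => g.1 == cw.1)).map
        (fun g => if (decide (window_start ≤ g.2) && decide (g.2 ≤ window_end)) = true then (1 : Int) else 0)).sum
      results ++ [(cw.1, window_start, window_end, variant_count, gene_count)]) results) []

-- ===== PORT B =====
-- helper 'bucket_counts' of Source B: one pass over the locations, counting per (chromosome, window index)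
def pvBucketCounts (cl : PySem.Dict String Int) (window_size : Int) (locations : List (String × Int)) : PySem.Dict (String × Int) Int :=
  locations.foldl (fun counts p =>
    match cl.get? p.1 with
    | some clen =>
        if (1:Int) ≤ p.2 ∧ p.2 ≤ clen then
          let key := (p.1, PySem.Int.floordiv (p.2 - 1) window_size)
          counts.insert key (counts.getD key 0 + 1)
        else counts
    | none => counts) PySem.Dict.empty

def count_variants_and_genes_alt (chromosome_lengths : List (String × Int)) (gene_locations : List (String × Int)) (variant_locations : List (String × Int)) (window_size : Int) : List (String × Int × Int × Int × Int) :=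
  let cl := PySem.Dict.ofList chromosome_lengths
  let variant_counts := pvBucketCounts cl window_size variant_locations
  let gene_counts := pvBucketCounts cl window_size gene_locations
  cl.items.foldl (fun results cw =>
    (PySem.List.pyRange 1 cw.2 window_size).foldl (fun results start =>
      let idx := PySem.Int.floordiv (start - 1) window_size
      results ++ [(cw.1, start, min (start + window_size - 1) cw.2,
                   variant_counts.getD (cw.1, idx) 0, gene_counts.getD (cw.1, idx) 0)]) results) []

-- ===== PRECONDITION & SPEC =====
-- Pre_ excludes only window_size = 0: there Python A raises ValueError (range() with step 0) as soon as any chromosome is iterated, and B raises too; only in the degenerate case of an empty chromosome dict do both return [].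
def Pre_count_variants_and_genes (chromosome_lengths : List (String × Int)) (gene_locations : List (String × Int)) (variant_locations : List (String × Int)) (window_size : Int) : Prop := window_size ≠ 0
instance (chromosome_lengths : List (String × Int)) (gene_locations : List (String × Int)) (variant_locations : List (String × Int)) (window_size : Int) : Decidable (Pre_count_variants_and_genes chromosome_lengths gene_locations variant_locations window_size) := by unfold Pre_count_variants_and_genes; infer_instance
def pvWitness_count_variants_and_genes : (List (String × Int)) × (List (String × Int)) × (List (String × Int)) × Int :=
  ([("chr1", 5)], [("chr1", 2)], [("chr1", 1), ("chr1", 4)], 2)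

def Spec_count_variants_and_genes (chromosome_lengths : List (String × Int)) (gene_locations : List (String × Int)) (variant_locations : List (String × Int)) (window_size : Int) (out : List (String × Int × Int × Int × Int)) : Prop := out = count_variants_and_genes_alt chromosome_lengths gene_locations variant_locations window_size
instance (chromosome_lengths : List (String × Int)) (gene_locations : List (String × Int)) (variant_locations : List (String × Int)) (window_size : Int) (out : List (String × Int × Int × Int × Int)) : Decidable (Spec_count_variants_and_genes chromosome_lengths gene_locations variant_locations window_size out) := by unfold Spec_count_variants_and_genes; infer_instance

-- ===== CLAIM =====
def Claim_equal_count_variants_and_genes : Prop := ∀ (chromosome_lengths : List (String × Int)) (gene_locations : List (String × Int)) (variant_locations : List (String × Int)) (window_size : Int), Dom_count_variants_and_genes chromosome_lengths gene_locations variant_locations window_size → Pre_count_variants_and_genes chromosome_lengths gene_locations variant_locations window_size → Spec_count_variants_and_genes chromosome_lengths gene_locations variant_locations window_size (count_variants_and_genes chromosome_lengths gene_locations variant_locations window_size)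

-- ===== LEMMAS AND PROOFS =====

-- a location p is counted into bucket k of the counter built over dict cl
def pvHit (cl : PySem.Dict String Int) (ws : Int) (k : String × Int) (p : String × Int) : Bool :=
  match PySem.Dict.get? cl p.1 with
  | some clen => decide ((1:Int) ≤ p.2 ∧ p.2 ≤ clen) && decide ((p.1, PySem.Int.floordiv (p.2 - 1) ws) = k)
  | none => false

lemma pvBucket_getD (cl : PySem.Dict String Int) (ws : Int) (locs : List (String × Int)) (k : String × Int) :
    (pvBucketCounts cl ws locs).getD k 0 = (locs.countP (pvHit cl ws k) : Int) := by
  suffices h : ∀ (d : PySem.Dict (String × Int) Int),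
      (locs.foldl (fun counts p =>
        match PySem.Dict.get? cl p.1 with
        | some clen =>
            if (1:Int) ≤ p.2 ∧ p.2 ≤ clen then
              let key := (p.1, PySem.Int.floordiv (p.2 - 1) ws)
              counts.insert key (counts.getD key 0 + 1)
            else counts
        | none => counts) d).getD k 0 = d.getD k 0 + (locs.countP (pvHit cl ws k) : Int) by
    simpa [pvBucketCounts, PySem.Dict.getD_empty] using h PySem.Dict.empty
  induction locs with
  | nil => intro d; simp
  | cons p locs ih =>
    intro d
    simp only [List.foldl_cons, List.countP_cons]
    rw [ih]
    cases ho : PySem.Dict.get? cl p.1 with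
    | none => simp [pvHit, ho]
    | some clen =>
      by_cases hin : (1:Int) ≤ p.2 ∧ p.2 ≤ clen
      · by_cases hk : (p.1, PySem.Int.floordiv (p.2 - 1) ws) = k
        · simp [pvHit, ho, hin, hk]
          omega
        · simp [pvHit, ho, hin, hk, PySem.Dict.getD_insert]
          intro h
          exact absurd h.symm hk
      · simp [pvHit, ho, hin]

-- a negative-step range starting at 1 is nonempty only below 1
lemma pvRange_neg_mem {L ws s : Int} (hws : ws < 0) (hs : s ∈ PySem.List.pyRange 1 L ws) : L < 1 := by
  by_contra hL
  rw [show PySem.List.pyRange 1 L ws = [] by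
    simp [PySem.List.pyRange, hws.ne, not_lt_of_ge (le_of_not_gt hL), if_neg (lt_asymm hws)]] at hs
  exact absurd hs (List.not_mem_nil)

-- the window [s, min (s+ws-1) L] is exactly the bucket of index (s-1)//ws among 1..L
lemma pvWindow_iff {L ws s : Int} (hws : ws ≠ 0) (hs : s ∈ PySem.List.pyRange 1 L ws) (p : Int) :
    (s ≤ p ∧ p ≤ min (s + ws - 1) L) ↔
      ((1:Int) ≤ p ∧ p ≤ L ∧ PySem.Int.floordiv (p - 1) ws = PySem.Int.floordiv (s - 1) ws) := by
  rcases lt_or_gt_of_ne hws with hneg | hpos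
  · have hL := pvRange_neg_mem hneg hs
    have hmin := min_le_left (s + ws - 1) L
    constructor
    · rintro ⟨h1, h2⟩; omega
    · rintro ⟨h1, h2, -⟩; omega
  · obtain ⟨h1s, hsL, c, hc⟩ := (PySem.List.mem_pyRange_iff_of_pos hpos s).mp hs
    have hq : PySem.Int.floordiv (s - 1) ws = c := by
      rw [PySem.Int.floordiv_eq_iff_of_pos hpos]
      constructor <;> nlinarith
    rw [hq, PySem.Int.floordiv_eq_iff_of_pos hpos]
    have e1 : (c + 1) * ws = c * ws + ws := by ring
    have e2 : ws * c = c * ws := mul_comm ws c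
    rw [e2] at hc
    rw [e1]
    obtain ⟨t, ht⟩ : ∃ t, c * ws = t := ⟨_, rfl⟩
    rw [ht] at hc ⊢
    omega

-- ===== VERDICT =====
theorem count_variants_and_genes_spec : Claim_equal_count_variants_and_genes := by
  unfold Claim_equal_count_variants_and_genes
  intro cl gl vl ws _ hws
  unfold Spec_count_variants_and_genes Pre_count_variants_and_genes at *
  unfold count_variants_and_genes count_variants_and_genes_alt
  simp only [PySem.List.foldl_append_singleton_eq_map, PySem.List.foldl_append_eq_flatMap,
    List.nil_append]
  apply List.flatMap_congr
  intro cw hcw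
  apply List.map_congr_left
  intro s hsr
  have hget : PySem.Dict.get? (PySem.Dict.ofList cl) cw.1 = some cw.2 :=
    PySem.Dict.get?_of_mem_items _ (by rcases cw with ⟨c, L⟩; exact hcw)
      (PySem.Dict.nodup_keys_ofList cl)
  have hcount : ∀ locs : List (String × Int),
      ((locs.filter (fun v => v.1 == cw.1)).map
        (fun v => if (decide (s ≤ v.2) && decide (v.2 ≤ min (s + ws - 1) cw.2)) = true then (1:Int) else 0)).sum
      = (pvBucketCounts (PySem.Dict.ofList cl) ws locs).getD
          (cw.1, PySem.Int.floordiv (s - 1) ws) 0 := by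
    intro locs
    rw [PySem.List.sum_map_ite_one_zero, pvBucket_getD, List.countP_filter]
    congr 1
    apply List.countP_congr
    intro v _
    simp only [Bool.and_eq_true, decide_eq_true_eq, beq_iff_eq, pvHit]
    by_cases hv : v.1 = cw.1
    · rw [hv, hget]
      simp only [Bool.and_eq_true, decide_eq_true_eq, Prod.mk.injEq]
      have hw := pvWindow_iff hws hsr v.2
      constructor
      · rintro ⟨⟨hp1, hp2⟩, -⟩
        obtain ⟨a, b, c⟩ := hw.mp ⟨hp1, hp2⟩
        exact ⟨⟨a, b⟩, trivial, c⟩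
      · rintro ⟨⟨a, b⟩, -, c⟩
        exact ⟨hw.mpr ⟨a, b, c⟩, trivial⟩
    · constructor
      · rintro ⟨-, h⟩; exact absurd h hv
      · intro h
        exfalso
        cases hg : PySem.Dict.get? (PySem.Dict.ofList cl) v.1 <;> rw [hg] at h
        · simp at h
        · simp only [Bool.and_eq_true, decide_eq_true_eq, Prod.mk.injEq] at h
          exact hv h.2.1
  rw [hcount vl, hcount gl]
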